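-- pv_equiv track=rewrite | github.com/songgimo/gimo | AlgoTrader/algorithm.py | node_check
-- ===== SOURCE A (Python) =====
-- def node_check(contents):
--     p_cnt = 0
--
--     oper_dict = {}
--     for c, i in enumerate(contents):
--         if i == '(':
--             p_cnt += 1
--             continue
--
--         elif i == ')':
--             p_cnt -= 1
--             continue
--
--         if p_cnt not in oper_dict:
--             oper_dict[p_cnt] = ''
--
--         oper_dict[p_cnt] = '{}{}'.format(oper_dict[p_cnt], i)
--
--     return sorted(oper_dict.items())
-- ===== SOURCE B (Python) =====
-- def node_check(contents):
--     # annotate every non-paren character with its paren depth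
--     pairs = []
--     depth = 0
--     for ch in contents:
--         if ch == '(':
--             depth += 1
--         elif ch == ')':
--             depth -= 1
--         else:
--             pairs.append((depth, ch))
--     # for each distinct depth, in increasing order, join that depth's characters
--     return [(d, ''.join(ch for dd, ch in pairs if dd == d))
--             for d in sorted(set(dd for dd, _ in pairs))]
-- ===== Notes on version B (the rewrite author's own statement) =====
-- stated objective: faster
-- what changed: B replaces A's incremental dict of per-depth strings (grown by repeated '{}{}'.format concatenation) with a depth-annotated pair list, building the result by mapping over the sorted distinct depths and joining each depth's characters once.
import Mathlib
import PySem

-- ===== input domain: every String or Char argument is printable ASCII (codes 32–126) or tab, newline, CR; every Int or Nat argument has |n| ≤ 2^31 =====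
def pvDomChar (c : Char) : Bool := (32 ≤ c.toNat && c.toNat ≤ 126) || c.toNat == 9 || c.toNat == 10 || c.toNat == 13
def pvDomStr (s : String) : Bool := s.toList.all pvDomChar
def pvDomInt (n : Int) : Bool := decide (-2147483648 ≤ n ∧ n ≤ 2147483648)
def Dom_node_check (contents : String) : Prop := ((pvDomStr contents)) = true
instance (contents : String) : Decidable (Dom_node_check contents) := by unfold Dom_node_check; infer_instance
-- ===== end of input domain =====

-- B replaces A's dict of incrementally concatenated per-depth strings with a depth-annotated pair list: sorted distinct depths, each joined once (measured faster; same result).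

-- ===== PORT A =====
def node_check (contents : String) : List (Int × String) :=
  let st := (PySem.List.enumerate contents.toList 0).foldl
    (fun (st : Int × PySem.Dict Int String) (ci : Int × Char) =>
      if ci.2 = '(' then (st.1 + 1, st.2)
      else if ci.2 = ')' then (st.1 - 1, st.2)
      else
        let d := if st.2.contains st.1 then st.2 else st.2.insert st.1 ""
        (st.1, d.insert st.1 (d.getD st.1 "" ++ String.singleton ci.2)))
    (0, PySem.Dict.empty)
  PySem.List.sorted2 st.2.items (fun p => p.1) (fun p => p.2) false

-- ===== PORT B =====
def node_check_alt (contents : String) : List (Int × String) :=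
  let st := contents.toList.foldl
    (fun (st : Int × List (Int × Char)) (ch : Char) =>
      if ch = '(' then (st.1 + 1, st.2)
      else if ch = ')' then (st.1 - 1, st.2)
      else (st.1, st.2 ++ [(st.1, ch)]))
    ((0 : Int), ([] : List (Int × Char)))
  (PySem.List.sorted (PySem.Set.ofList (st.2.map (fun p => p.1))) (fun x => x) false).map
    (fun d => (d, PySem.Str.join "" ((st.2.filter (fun p => p.1 == d)).map (fun p => String.singleton p.2))))

-- ===== PRECONDITION & SPEC =====
def Spec_node_check (contents : String) (out : List (Int × String)) : Prop := out = node_check_alt contents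
instance (contents : String) (out : List (Int × String)) : Decidable (Spec_node_check contents out) := by unfold Spec_node_check; infer_instance

-- ===== CLAIM (what is proved, stated in full; the proofs are below) =====
def Claim_equal_node_check : Prop := ∀ (contents : String), Dom_node_check contents → Spec_node_check contents (node_check contents)

-- ===== LEMMAS AND PROOFS =====

-- A's loop body (index of enumerate dropped: the Python never uses `c`)
def pvAStep (st : Int × PySem.Dict Int String) (ch : Char) : Int × PySem.Dict Int String :=
  if ch = '(' then (st.1 + 1, st.2)
  else if ch = ')' then (st.1 - 1, st.2)
  else
    let d := if st.2.contains st.1 then st.2 else st.2.insert st.1 ""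
    (st.1, d.insert st.1 (d.getD st.1 "" ++ String.singleton ch))

-- B's loop body
def pvBStep (st : Int × List (Int × Char)) (ch : Char) : Int × List (Int × Char) :=
  if ch = '(' then (st.1 + 1, st.2)
  else if ch = ')' then (st.1 - 1, st.2)
  else (st.1, st.2 ++ [(st.1, ch)])

theorem pvEnumerate_cons (x : Char) (t : List Char) (s : Int) :
    PySem.List.enumerate (x :: t) s = (s, x) :: PySem.List.enumerate t (s + 1) := rfl

theorem pvAFold_enum (xs : List Char) : ∀ (s : Int) (st : Int × PySem.Dict Int String),
    (PySem.List.enumerate xs s).foldl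
      (fun (st : Int × PySem.Dict Int String) (ci : Int × Char) =>
        if ci.2 = '(' then (st.1 + 1, st.2)
        else if ci.2 = ')' then (st.1 - 1, st.2)
        else
          let d := if st.2.contains st.1 then st.2 else st.2.insert st.1 ""
          (st.1, d.insert st.1 (d.getD st.1 "" ++ String.singleton ci.2))) st
    = xs.foldl pvAStep st := by
  induction xs with
  | nil => intro s st; rfl
  | cons x t ih =>
    intro s st
    rw [pvEnumerate_cons, List.foldl_cons, List.foldl_cons, ih]
    rfl

theorem pvBFold_append (xs : List Char) : ∀ (n : Int) (ps : List (Int × Char)),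
    xs.foldl pvBStep (n, ps)
      = ((xs.foldl pvBStep (n, [])).1, ps ++ (xs.foldl pvBStep (n, [])).2) := by
  induction xs with
  | nil => intro n ps; simp
  | cons x t ih =>
    intro n ps
    simp only [List.foldl_cons, pvBStep]
    by_cases h1 : x = '('
    · simp only [h1, reduceIte]
      exact ih (n + 1) ps
    · by_cases h2 : x = ')'
      · simp only [h2, reduceIte]
        exact ih (n - 1) ps
      · simp only [h1, h2, reduceIte, List.nil_append]
        rw [ih n (ps ++ [(n, x)]), ih n [(n, x)]]
        simp

-- after a non-paren char the two branches of A collapse to one insert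
theorem pvAStep_char (d : PySem.Dict Int String) (n : Int) (ch : Char) :
    (if d.contains n then d else d.insert n "").insert n
        ((if d.contains n then d else d.insert n "").getD n "" ++ String.singleton ch)
      = d.insert n (d.getD n "" ++ String.singleton ch) := by
  by_cases h : d.contains n = true
  · simp [h]
  · rw [if_neg h, PySem.Dict.getD_insert_self, PySem.Dict.insert_insert_self,
        PySem.Dict.getD_of_not_contains (h := eq_false_of_ne_true h)]

theorem pvKeys_insert_eq_add (d : PySem.Dict Int String) (k : Int) (v : String) :
    (d.insert k v).keys = PySem.Set.add d.keys k := by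
  by_cases h : d.contains k
  · rw [PySem.Dict.keys_insert_of_contains _ _ h, PySem.Set.add]
    have : k ∈ d.keys := (PySem.Dict.contains_iff_mem_keys d k).mp h
    simp [PySem.Set.contains, this]
  · rw [PySem.Dict.keys_insert_of_not_contains _ _ (eq_false_of_ne_true h), PySem.Set.add]
    have : ¬ k ∈ d.keys := fun hm => h ((PySem.Dict.contains_iff_mem_keys d k).mpr hm)
    simp [PySem.Set.contains, this]

-- main invariant: A's fold and B's fold agree on the counter; A's dict holds,
-- per key, the concatenation of B's chars at that key, with keys accumulated in order
theorem pvMain (xs : List Char) : ∀ (n : Int) (d : PySem.Dict Int String), d.keys.Nodup →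
    (xs.foldl pvAStep (n, d)).1 = (xs.foldl pvBStep (n, [])).1 ∧
    (xs.foldl pvAStep (n, d)).2.keys
      = PySem.Set.update d.keys ((xs.foldl pvBStep (n, [])).2.map (fun p => p.1)) ∧
    (xs.foldl pvAStep (n, d)).2.keys.Nodup ∧
    ∀ k : Int, (xs.foldl pvAStep (n, d)).2.getD k ""
      = d.getD k "" ++ String.ofList
          (((xs.foldl pvBStep (n, [])).2.filter (fun p => p.1 == k)).map (fun p => p.2)) := by
  induction xs with
  | nil =>
    intro n d hnd
    refine ⟨rfl, by simp [PySem.Set.update], hnd, fun k => ?_⟩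
    apply String.toList_inj.mp; simp
  | cons x t ih =>
    intro n d hnd
    by_cases h1 : x = '('
    · simpa [pvAStep, pvBStep, h1] using ih (n + 1) d hnd
    · by_cases h2 : x = ')'
      · simpa [pvAStep, pvBStep, h1, h2] using ih (n - 1) d hnd
      · simp only [List.foldl_cons, pvAStep, pvBStep, h1, h2, reduceIte,
          List.nil_append]
        rw [pvAStep_char d n x, pvBFold_append t n [(n, x)]]
        set d' := d.insert n (d.getD n "" ++ String.singleton x) with hd' 
        have hnd' : d'.keys.Nodup := PySem.Dict.nodup_keys_insert _ _ _ hnd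
        obtain ⟨hc, hk, hn2, hg⟩ := ih n d' hnd'
        refine ⟨by simpa using hc, ?_, hn2, fun k => ?_⟩
        · rw [hk, hd', pvKeys_insert_eq_add]
          simp [PySem.Set.update]
        · rw [hg k]
          by_cases hkn : k = n
          · subst hkn
            rw [hd', PySem.Dict.getD_insert_self]
            apply String.toList_inj.mp
            simp [String.singleton]
          · rw [hd', PySem.Dict.getD_insert_of_ne _ _ _ hkn]
            have : List.filter (fun p => p.1 == k) ((n, x) :: (t.foldl pvBStep (n, [])).2)
                = List.filter (fun p => p.1 == k) (t.foldl pvBStep (n, [])).2 := by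
              simp [Ne.symm hkn]
            simp only [List.singleton_append, this]

-- insertBy commutes with mapping k ↦ (k, f k)
theorem pvInsertBy_map (f : Int → String)
    (before : (Int × String) → (Int × String) → Bool) (x : Int) (ys : List Int) :
    PySem.List.insertBy before (x, f x) (ys.map (fun k => (k, f k)))
      = (PySem.List.insertBy (fun a b => before (a, f a) (b, f b)) x ys).map (fun k => (k, f k)) := by
  induction ys with
  | nil => rfl
  | cons y t ih =>
    simp only [List.map_cons, PySem.List.insertBy]
    by_cases h : before (x, f x) (y, f y) <;> simp [h, ih]

theorem pvFoldl_insertBy_map (f : Int → String)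
    (before : (Int × String) → (Int × String) → Bool) (l : List Int) :
    ∀ acc : List Int,
    (l.map (fun k => (k, f k))).foldl (fun a p => PySem.List.insertBy before p a)
        (acc.map (fun k => (k, f k)))
      = (l.foldl (fun a x => PySem.List.insertBy (fun a b => before (a, f a) (b, f b)) x a) acc).map
          (fun k => (k, f k)) := by
  induction l with
  | nil => intro acc; rfl
  | cons x t ih =>
    intro acc
    simp only [List.map_cons, List.foldl_cons]
    rw [pvInsertBy_map, ih]

-- Python's lexicographic tuple comparison on pairs with distinct first components is
-- comparison of the first components
theorem pvBefore_eq (f : Int → String) (a b : Int) :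
    (decide (a < b) || (!decide (b < a) && decide (f a < f b))) = decide (a < b) := by
  by_cases h1 : a < b
  · simp [h1]
  · by_cases h2 : b < a
    · simp [h1, h2]
    · have hab : a = b := le_antisymm (not_lt.mp h2) (not_lt.mp h1)
      subst hab
      simp

theorem pvSorted2_map (f : Int → String) (l : List Int) :
    PySem.List.sorted2 (l.map (fun k => (k, f k))) (fun p => p.1) (fun p => p.2) false
      = (PySem.List.sorted l (fun x => x) false).map (fun k => (k, f k)) := by
  have hbef : (fun a b : Int =>
      (decide ((a, f a).1 < (b, f b).1) ||
        (!decide ((b, f b).1 < (a, f a).1) && decide ((a, f a).2 < (b, f b).2))))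
      = (fun a b : Int => decide (a < b)) := by
    funext a b
    exact pvBefore_eq f a b
  rw [PySem.List.sorted_eq_foldl_insertBy, ← hbef]
  rw [show (PySem.List.sorted2 (l.map (fun k => (k, f k))) (fun p => p.1) (fun p => p.2) false)
      = (l.map (fun k => (k, f k))).foldl
          (fun acc p => PySem.List.insertBy
            (fun a b => decide (a.1 < b.1) || (!decide (b.1 < a.1) && decide (a.2 < b.2))) p acc)
          [] from rfl]
  rw [show ([] : List (Int × String)) = List.map (fun k => (k, f k)) [] from rfl]
  exact pvFoldl_insertBy_map f
    (fun a b => decide (a.1 < b.1) || (!decide (b.1 < a.1) && decide (a.2 < b.2))) l []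

-- ===== VERDICT (by name: the statement is the Claim_ definition above) =====
theorem node_check_spec : Claim_equal_node_check := by
  intro contents _
  unfold Spec_node_check node_check node_check_alt
  simp only
  rw [pvAFold_enum contents.toList 0]
  obtain ⟨_, hk, hnd, hg⟩ := pvMain contents.toList 0 PySem.Dict.empty (by simp)
  set B := contents.toList.foldl pvBStep (0, []) with hB
  have hfold : contents.toList.foldl
      (fun (st : Int × List (Int × Char)) (ch : Char) =>
        if ch = '(' then (st.1 + 1, st.2)
        else if ch = ')' then (st.1 - 1, st.2)
        else (st.1, st.2 ++ [(st.1, ch)])) ((0 : Int), ([] : List (Int × Char))) = B := rfl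
  rw [hfold]
  have hkeys : (contents.toList.foldl pvAStep (0, PySem.Dict.empty)).2.keys
      = PySem.Set.ofList (B.2.map (fun p => p.1)) := by
    rw [hk]
    rw [show PySem.Dict.empty.keys = ([] : List Int) from rfl]
    rw [show (PySem.Set.update ([] : List Int) (B.2.map (fun p => p.1)))
        = (B.2.map (fun p => p.1)).foldl PySem.Set.add [] from rfl]
    rw [PySem.Set.ofList_eq_foldl]
  rw [PySem.Dict.items_eq_map_keys _ hnd "", hkeys]
  rw [pvSorted2_map (fun k => (contents.toList.foldl pvAStep (0, PySem.Dict.empty)).2.getD k "")]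
  apply List.map_congr_left
  intro k _
  refine Prod.ext rfl ?_
  simp only
  rw [hg k]
  apply String.toList_inj.mp
  simp only [PySem.Str.join, PySem.Dict.getD_empty, String.toList_append, String.toList_ofList]
  rw [show ("" : String).toList = ([] : List Char) from rfl]
  rw [List.map_map]
  rw [show (List.map (String.toList ∘ fun p : Int × Char => String.singleton p.2)
        (List.filter (fun p => p.1 == k) B.2))
      = List.map ((fun c => [c]) ∘ fun p : Int × Char => p.2)
          (List.filter (fun p => p.1 == k) B.2) from by simp [String.singleton]]
  rw [← List.map_map, PySem.Chars.join_nil_singletons]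
  simp
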